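-- pv_equiv track=rewrite | github.com/raymond-project/graduation-project_code | global_graph/pwr取出錯誤未達節點.py | bfs_all_pairs_shortest_hops
-- ===== SOURCE A (Python) =====
-- import math, collections
--
-- def bfs_all_pairs_shortest_hops(nodes, adj, limit_hops=6):
--     dist={}; node_set=set(nodes)
--     for src in nodes:
--         q=collections.deque([(src,0)]); seen={src}; dmap={src:0}
--         while q:
--             u,d=q.popleft()
--             if d>=limit_hops: continue
--             for v in adj.get(u,[]):
--                 if v not in seen:
--                     seen.add(v); dmap[v]=d+1; q.append((v,d+1))
--         dist[src]={v:d for v,d in dmap.items() if v in node_set}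
--     return dist
-- ===== SOURCE B (Python) =====
-- def bfs_all_pairs_shortest_hops(nodes, adj, limit_hops=6):
--     dist = {}
--     node_set = set(nodes)
--     for src in nodes:
--         dmap = {src: 0}
--         frontier = [src]
--         for d in range(limit_hops):
--             if not frontier:
--                 break
--             nxt = []
--             for u in frontier:
--                 for v in adj.get(u, []):
--                     if v not in dmap:
--                         dmap[v] = d + 1
--                         nxt.append(v)
--             frontier = nxt
--         dist[src] = {v: d for v, d in dmap.items() if v in node_set}
--     return dist
-- ===== Notes on version B (the rewrite author's own statement) =====
-- stated objective: alternative
-- what changed: Each source's queue-based BFS (popping (node,distance) pairs from a deque with a separate seen set) is replaced by a level-synchronous sweep: a frontier list per hop level, iterated limit_hops times with early exit, using the distance map itself as the visited set.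
import Mathlib
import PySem

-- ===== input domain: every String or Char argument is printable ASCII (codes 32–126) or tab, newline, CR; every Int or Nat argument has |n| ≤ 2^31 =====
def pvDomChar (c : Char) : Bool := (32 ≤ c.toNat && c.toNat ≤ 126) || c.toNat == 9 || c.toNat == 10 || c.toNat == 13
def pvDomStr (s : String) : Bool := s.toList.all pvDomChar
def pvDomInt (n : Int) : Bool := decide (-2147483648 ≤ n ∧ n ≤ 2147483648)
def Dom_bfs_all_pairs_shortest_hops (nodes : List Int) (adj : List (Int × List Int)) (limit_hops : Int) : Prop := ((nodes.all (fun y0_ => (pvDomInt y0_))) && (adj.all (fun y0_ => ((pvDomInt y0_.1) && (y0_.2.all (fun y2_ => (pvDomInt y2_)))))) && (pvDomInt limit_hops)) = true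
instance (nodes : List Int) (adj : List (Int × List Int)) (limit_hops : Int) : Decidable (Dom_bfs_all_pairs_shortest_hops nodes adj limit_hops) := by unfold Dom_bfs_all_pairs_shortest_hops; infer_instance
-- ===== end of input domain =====

-- B replaces A's deque-of-(node,distance)-pairs BFS (with a separate `seen` set) by a
-- level-synchronous frontier sweep that uses the distance map itself as the visited set
-- (objective: alternative decomposition, same asymptotic cost).

-- ===== PORT A =====
-- fuel bound for A's while-loop: total enqueues ≤ 1 + (number of adjacency-list entries);
-- the loop itself is a transliteration of A's `while q: u,d = q.popleft(); ...`
def pvFuelA (adj : List (Int × List Int)) : Nat := 1 + (adj.map (fun p => p.2.length)).sum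

def pvBfsA (adjD : PySem.Dict Int (List Int)) (limit : Int) :
    Nat → List (Int × Int) → PySem.Set Int → PySem.Dict Int Int → PySem.Dict Int Int
  | 0, _, _, m => m
  | _ + 1, [], _, m => m
  | f + 1, (u, d) :: rest, s, m =>
    if limit ≤ d then pvBfsA adjD limit f rest s m
    else
      let st := (adjD.getD u []).foldl
        (fun (acc : PySem.Set Int × PySem.Dict Int Int × List (Int × Int)) v =>
          if PySem.Set.contains acc.1 v then acc
          else (PySem.Set.add acc.1 v, acc.2.1.insert v (d + 1), acc.2.2 ++ [(v, d + 1)]))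
        (s, m, rest)
      pvBfsA adjD limit f st.2.2 st.1 st.2.1

-- dist[src] = {v: d for v, d in dmap.items() if v in node_set}
def pvPackA (m : PySem.Dict Int Int) (ns : PySem.Set Int) : List (Int × Int) :=
  ((m.items.filter (fun p => PySem.Set.contains ns p.1)).foldl
    (fun (d : PySem.Dict Int Int) p => d.insert p.1 p.2) PySem.Dict.empty).items

def bfs_all_pairs_shortest_hops (nodes : List Int) (adj : List (Int × List Int)) (limit_hops : Int) : List (Int × List (Int × Int)) :=
  let nodeSet := PySem.Set.ofList nodes
  let adjD := PySem.Dict.mk adj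
  (nodes.foldl
    (fun (dist : PySem.Dict Int (List (Int × Int))) src =>
      dist.insert src
        (pvPackA
          (pvBfsA adjD limit_hops (pvFuelA adj) [(src, 0)]
            (PySem.Set.ofList [src]) (PySem.Dict.mk [(src, 0)]))
          nodeSet))
    PySem.Dict.empty).items

-- ===== PORT B =====
-- one level: scan the frontier, record unseen neighbours at distance d+1, collect the next frontier
def pvStepB (adjD : PySem.Dict Int (List Int)) (d : Int) (frontier : List Int)
    (m : PySem.Dict Int Int) : PySem.Dict Int Int × List Int :=
  frontier.foldl
    (fun acc u =>
      (adjD.getD u []).foldl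
        (fun (acc : PySem.Dict Int Int × List Int) v =>
          if acc.1.contains v then acc else (acc.1.insert v (d + 1), acc.2 ++ [v]))
        acc)
    (m, [])

-- `for d in range(limit_hops): if not frontier: break; ...` (fuel = iterations left, d = level)
def pvBfsB (adjD : PySem.Dict Int (List Int)) :
    Nat → Int → List Int → PySem.Dict Int Int → PySem.Dict Int Int
  | 0, _, _, m => m
  | f + 1, d, frontier, m =>
    if frontier.isEmpty then m
    else
      let st := pvStepB adjD d frontier m
      pvBfsB adjD f (d + 1) st.2 st.1

def pvPackB (m : PySem.Dict Int Int) (ns : PySem.Set Int) : List (Int × Int) :=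
  ((m.items.filter (fun p => PySem.Set.contains ns p.1)).foldl
    (fun (d : PySem.Dict Int Int) p => d.insert p.1 p.2) PySem.Dict.empty).items

def bfs_all_pairs_shortest_hops_alt (nodes : List Int) (adj : List (Int × List Int)) (limit_hops : Int) : List (Int × List (Int × Int)) :=
  let nodeSet := PySem.Set.ofList nodes
  let adjD := PySem.Dict.mk adj
  (nodes.foldl
    (fun (dist : PySem.Dict Int (List (Int × Int))) src =>
      dist.insert src
        (pvPackB (pvBfsB adjD limit_hops.toNat 0 [src] (PySem.Dict.mk [(src, 0)])) nodeSet))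
    PySem.Dict.empty).items

-- ===== PRECONDITION & SPEC =====
def Spec_bfs_all_pairs_shortest_hops (nodes : List Int) (adj : List (Int × List Int)) (limit_hops : Int) (out : List (Int × List (Int × Int))) : Prop := out = bfs_all_pairs_shortest_hops_alt nodes adj limit_hops
instance (nodes : List Int) (adj : List (Int × List Int)) (limit_hops : Int) (out : List (Int × List (Int × Int))) : Decidable (Spec_bfs_all_pairs_shortest_hops nodes adj limit_hops out) := by unfold Spec_bfs_all_pairs_shortest_hops; infer_instance

-- ===== CLAIM (what is proved, stated in full; the proofs are below) =====
def Claim_equal_bfs_all_pairs_shortest_hops : Prop := ∀ (nodes : List Int) (adj : List (Int × List Int)) (limit_hops : Int), Dom_bfs_all_pairs_shortest_hops nodes adj limit_hops → Spec_bfs_all_pairs_shortest_hops nodes adj limit_hops (bfs_all_pairs_shortest_hops nodes adj limit_hops)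

-- ===== LEMMAS AND PROOFS =====

-- all adjacency-list values of the dict
def pvAdjVals (adjD : PySem.Dict Int (List Int)) : List Int := adjD.items.flatMap (fun p => p.2)

-- the distance-map after inserting the fresh nodes `app` at distance d+1
def pvIns (m : PySem.Dict Int Int) (d : Int) (app : List Int) : PySem.Dict Int Int :=
  app.foldl (fun (m : PySem.Dict Int Int) v => m.insert v (d + 1)) m

lemma pvMemAdjVals (adjD : PySem.Dict Int (List Int)) (u v : Int)
    (h : v ∈ adjD.getD u []) : v ∈ pvAdjVals adjD := by
  rw [PySem.Dict.getD_eq_get?_getD] at h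
  cases hg : adjD.get? u with
  | none => rw [hg] at h; simp at h
  | some l =>
    rw [hg] at h; simp at h
    exact List.mem_flatMap.mpr ⟨(u, l), PySem.Dict.mem_items_of_get?_eq_some _ hg, h⟩
-- processing the adjacency list of one node: A's inner for-loop and B's inner for-loop
-- discover the same fresh nodes `app`, in the same order.
lemma pvInner (d : Int) (vals : List Int) :
    ∀ (s : PySem.Set Int) (m : PySem.Dict Int Int) (qA : List (Int × Int)) (qB : List Int),
    (∀ v, PySem.Set.contains s v = m.contains v) →
    ∃ app : List Int,
      vals.foldl
        (fun (acc : PySem.Set Int × PySem.Dict Int Int × List (Int × Int)) v =>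
          if PySem.Set.contains acc.1 v then acc
          else (PySem.Set.add acc.1 v, acc.2.1.insert v (d + 1), acc.2.2 ++ [(v, d + 1)]))
        (s, m, qA)
        = (s ++ app, pvIns m d app, qA ++ app.map (fun v => (v, d + 1)))
      ∧ vals.foldl
          (fun (acc : PySem.Dict Int Int × List Int) v =>
            if acc.1.contains v then acc else (acc.1.insert v (d + 1), acc.2 ++ [v]))
          (m, qB)
          = (pvIns m d app, qB ++ app)
      ∧ app.Nodup
      ∧ (∀ v ∈ app, v ∈ vals ∧ PySem.Set.contains s v = false)
      ∧ (∀ v, PySem.Set.contains (s ++ app) v = (pvIns m d app).contains v) := by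
  induction vals with
  | nil =>
    intro s m qA qB hR
    exact ⟨[], by simp [pvIns], by simp [pvIns], by simp, by simp, by simpa [pvIns] using hR⟩
  | cons v vs ih =>
    intro s m qA qB hR
    simp only [List.foldl_cons]
    cases hc : PySem.Set.contains s v with
    | true =>
      have hc' : m.contains v = true := by rw [← hR v]; exact hc
      simp only [hc', reduceIte]
      obtain ⟨app, hA, hB, hnd, hmem, hR'⟩ := ih s m qA qB hR
      exact ⟨app, hA, hB, hnd, fun w hw => ⟨List.mem_cons_of_mem v (hmem w hw).1, (hmem w hw).2⟩, hR'⟩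
    | false =>
      have hc' : m.contains v = false := by rw [← hR v]; exact hc
      simp only [hc', Bool.false_eq_true, reduceIte]
      have hv : v ∉ s := by simpa using hc
      have hadd : PySem.Set.add s v = s ++ [v] := by simp [PySem.Set.add, hv]
      rw [hadd]
      have hR2 : ∀ w, PySem.Set.contains (s ++ [v]) w = (m.insert v (d + 1)).contains w := by
        intro w
        have hRw := hR w
        rw [PySem.Dict.contains_insert]
        by_cases hwv : w = v
        · subst hwv; simp
        · simp only [PySem.Set.contains_eq_listContains] at hRw ⊢
          rw [← hRw]
          simp [hwv]
      obtain ⟨app, hA, hB, hnd, hmem, hR'⟩ :=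
        ih (s ++ [v]) (m.insert v (d + 1)) (qA ++ [(v, d + 1)]) (qB ++ [v]) hR2
      refine ⟨v :: app, ?_, ?_, ?_, ?_, ?_⟩
      · rw [hA]; simp [pvIns]
      · rw [hB]; simp [pvIns]
      · refine List.nodup_cons.mpr ⟨?_, hnd⟩
        intro hv
        have := (hmem v hv).2
        simp [PySem.Set.contains_eq_listContains] at this
      · intro w hw
        rcases List.mem_cons.mp hw with rfl | hw'
        · exact ⟨List.mem_cons_self, hc⟩
        · have h2 := (hmem w hw').2
          simp only [PySem.Set.contains_eq_listContains, List.contains_append, Bool.or_eq_false_iff] at h2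
          refine ⟨List.mem_cons_of_mem v (hmem w hw').1, ?_⟩
          simpa [PySem.Set.contains_eq_listContains] using h2.1
      · intro w
        have := hR' w
        simpa [pvIns, List.append_assoc] using this
-- processing one full level: A's queue, while it holds `cur` at depth d followed by `nxt`
-- at depth d+1, performs exactly B's frontier sweep over `cur`.
lemma pvLevel (adjD : PySem.Dict Int (List Int)) (limit d : Int) (hd : d < limit) :
    ∀ (cur : List Int) (fuel : Nat) (s : PySem.Set Int) (m : PySem.Dict Int Int)
      (nxt qB : List Int),
    cur.length ≤ fuel →
    (∀ v, PySem.Set.contains s v = m.contains v) →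
    ∃ app : List Int,
      pvBfsA adjD limit fuel
          (cur.map (fun v => (v, d)) ++ nxt.map (fun v => (v, d + 1))) s m
        = pvBfsA adjD limit (fuel - cur.length)
            ((nxt ++ app).map (fun v => (v, d + 1))) (s ++ app) (pvIns m d app)
      ∧ cur.foldl
          (fun acc u =>
            (adjD.getD u []).foldl
              (fun (acc : PySem.Dict Int Int × List Int) v =>
                if acc.1.contains v then acc else (acc.1.insert v (d + 1), acc.2 ++ [v]))
              acc)
          (m, qB)
          = (pvIns m d app, qB ++ app)
      ∧ app.Nodup
      ∧ (∀ v ∈ app, v ∈ pvAdjVals adjD ∧ PySem.Set.contains s v = false)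
      ∧ (∀ v, PySem.Set.contains (s ++ app) v = (pvIns m d app).contains v) := by
  intro cur
  induction cur with
  | nil =>
    intro fuel s m nxt qB _ hR
    exact ⟨[], by simp [pvIns], by simp [pvIns], by simp, by simp, by simpa [pvIns] using hR⟩
  | cons u cur ih =>
    rintro (_ | f) s m nxt qB hlen hR
    · simp at hlen
    · simp only [List.map_cons, List.cons_append]
      rw [pvBfsA, if_neg (not_le.mpr hd)]
      obtain ⟨app1, hA1, hB1, hnd1, hmem1, hR1⟩ :=
        pvInner d (adjD.getD u []) s m
          (cur.map (fun v => (v, d)) ++ nxt.map (fun v => (v, d + 1))) qB hR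
      simp only [hA1]
      have hq : (cur.map (fun v => (v, d)) ++ nxt.map (fun v => (v, d + 1)))
          ++ app1.map (fun v => (v, d + 1))
          = cur.map (fun v => (v, d)) ++ (nxt ++ app1).map (fun v => (v, d + 1)) := by
        simp [List.append_assoc]
      rw [hq]
      obtain ⟨app2, hA2, hB2, hnd2, hmem2, hR2⟩ :=
        ih f (s ++ app1) (pvIns m d app1) (nxt ++ app1) (qB ++ app1)
          (by simpa using Nat.le_of_succ_le_succ hlen) hR1
      refine ⟨app1 ++ app2, ?_, ?_, ?_, ?_, ?_⟩
      · rw [hA2]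
        simp [pvIns, List.append_assoc, List.foldl_append]
      · simp only [List.foldl_cons]
        rw [hB1, hB2]
        simp [pvIns, List.append_assoc, List.foldl_append]
      · refine List.Nodup.append hnd1 hnd2 ?_
        intro w hw1 hw2
        have := (hmem2 w hw2).2
        simp [PySem.Set.contains_eq_listContains] at this
        exact absurd hw1 (by simpa using this.2)
      · intro w hw
        rcases List.mem_append.mp hw with hw1 | hw2
        · exact ⟨pvMemAdjVals adjD u w (hmem1 w hw1).1, (hmem1 w hw1).2⟩
        · have := (hmem2 w hw2).2
          simp only [PySem.Set.contains_eq_listContains, List.contains_append, Bool.or_eq_false_iff] at this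
          exact ⟨(hmem2 w hw2).1, by simpa [PySem.Set.contains_eq_listContains] using this.1⟩
      · intro w
        have := hR2 w
        simpa [pvIns, List.append_assoc, List.foldl_append] using this
-- once every queued distance has reached the limit, A's loop drains without changing dmap
lemma pvSkip (adjD : PySem.Dict Int (List Int)) (limit : Int) :
    ∀ (items : List (Int × Int)) (fuel : Nat) (s : PySem.Set Int) (m : PySem.Dict Int Int),
    items.length ≤ fuel → (∀ p ∈ items, limit ≤ p.2) →
    pvBfsA adjD limit fuel items s m = m := by
  intro items
  induction items with
  | nil => intro fuel s m _ _; cases fuel <;> rfl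
  | cons p rest ih =>
    rintro (_ | f) s m hlen hall
    · simp at hlen
    · obtain ⟨u, d⟩ := p
      have hd : limit ≤ d := hall (u, d) (by simp)
      rw [pvBfsA, if_pos hd]
      exact ih f s m (by simpa using hlen) (fun q hq => hall q (by simp [hq]))
-- the main invariant: a single-level queue state of A equals B's level loop
lemma pvMain (adjD : PySem.Dict Int (List Int)) (limit : Int) :
    ∀ (k : Nat) (d : Int) (frontier : List Int) (s : PySem.Set Int)
      (m : PySem.Dict Int Int) (fuel : Nat),
    (limit - d).toNat = k →
    (∀ v, PySem.Set.contains s v = m.contains v) →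
    frontier.length + (((pvAdjVals adjD).toFinset) \ s.toFinset).card ≤ fuel →
    pvBfsA adjD limit fuel (frontier.map (fun v => (v, d))) s m
      = pvBfsB adjD k d frontier m := by
  intro k
  induction k with
  | zero =>
    intro d frontier s m fuel hk hR hfuel
    have hd : limit ≤ d := by omega
    rw [pvBfsB]
    exact pvSkip adjD limit _ fuel s m (by simpa using le_trans (Nat.le_add_right _ _) hfuel)
      (by intro p hp; obtain ⟨v, _, rfl⟩ := List.mem_map.mp hp; exact hd)
  | succ k ih =>
    intro d frontier s m fuel hk hR hfuel
    cases frontier with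
    | nil =>
      rw [pvBfsB]
      simp only [List.isEmpty_nil, if_true, List.map_nil]
      cases fuel <;> rfl
    | cons u fr =>
      have hd : d < limit := by omega
      rw [pvBfsB]
      simp only [List.isEmpty_cons, Bool.false_eq_true, if_false]
      obtain ⟨app, hA, hB, hnd, hmem, hR'⟩ :=
        pvLevel adjD limit d hd (u :: fr) fuel s m [] [] (by omega) hR
      simp only [List.map_nil, List.append_nil] at hA
      rw [hA]
      have hstep : pvStepB adjD d (u :: fr) m = (pvIns m d app, app) := by
        rw [pvStepB, hB]; simp
      rw [hstep]
      simp only [List.nil_append] at hA ⊢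
      -- cardinality bookkeeping for the remaining fuel
      have happV : app.toFinset ⊆ (pvAdjVals adjD).toFinset \ s.toFinset := by
        intro w hw
        rw [List.mem_toFinset] at hw
        rcases hmem w hw with ⟨h1, h2⟩
        rw [Finset.mem_sdiff, List.mem_toFinset, List.mem_toFinset]
        exact ⟨h1, by simpa using h2⟩
      have hcard : ((pvAdjVals adjD).toFinset \ (s ++ app).toFinset).card
          = ((pvAdjVals adjD).toFinset \ s.toFinset).card - app.length := by
        rw [List.toFinset_append]
        have h1 : (pvAdjVals adjD).toFinset \ (s.toFinset ∪ app.toFinset)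
            = ((pvAdjVals adjD).toFinset \ s.toFinset) \ app.toFinset := by
          ext x; simp [Finset.mem_sdiff]; tauto
        rw [h1, Finset.card_sdiff, Finset.inter_eq_left.mpr happV,
          List.toFinset_card_of_nodup hnd]
      have happle : app.length ≤ ((pvAdjVals adjD).toFinset \ s.toFinset).card := by
        calc app.length = app.toFinset.card := (List.toFinset_card_of_nodup hnd).symm
          _ ≤ _ := Finset.card_le_card happV
      exact ih (d + 1) app (s ++ app) (pvIns m d app) (fuel - (u :: fr).length)
        (by omega) hR' (by rw [hcard]; simp at hfuel ⊢; omega)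
lemma pvPerSrc (adj : List (Int × List Int)) (limit src : Int) :
    pvBfsA (PySem.Dict.mk adj) limit (pvFuelA adj) [(src, 0)]
        (PySem.Set.ofList [src]) (PySem.Dict.mk [(src, 0)])
      = pvBfsB (PySem.Dict.mk adj) limit.toNat 0 [src] (PySem.Dict.mk [(src, 0)]) := by
  have h1 : ([(src, 0)] : List (Int × Int)) = [src].map (fun v => (v, 0)) := rfl
  rw [h1]
  apply pvMain
  · simp
  · intro v
    have hof : PySem.Set.ofList [src] = [src] := rfl
    rw [hof]
    simp only [PySem.Set.contains_eq_listContains]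
    by_cases hv : v = src
    · subst hv; simp
    · simp [hv, Ne.symm hv]
  · have hcard : (((pvAdjVals (PySem.Dict.mk adj)).toFinset)
        \ (PySem.Set.ofList [src]).toFinset).card ≤ (adj.map (fun p => p.2.length)).sum := by
      calc _ ≤ (pvAdjVals (PySem.Dict.mk adj)).toFinset.card :=
              Finset.card_le_card (Finset.sdiff_subset)
        _ ≤ (pvAdjVals (PySem.Dict.mk adj)).length := List.toFinset_card_le _
        _ = (adj.map (fun p => p.2.length)).sum := by
              simp [pvAdjVals, List.length_flatMap]
    simp only [List.length_cons, List.length_nil, pvFuelA]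
    omega
-- ===== VERDICT (by name: the statement is the Claim_ definition above) =====
theorem bfs_all_pairs_shortest_hops_spec : Claim_equal_bfs_all_pairs_shortest_hops := by
  intro nodes adj limit _
  unfold Spec_bfs_all_pairs_shortest_hops bfs_all_pairs_shortest_hops bfs_all_pairs_shortest_hops_alt
  simp only [pvPerSrc]
  rfl
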